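-- pv_equiv track=rewrite | github.com/da-in/algorithm-study | Programmers - 고득점 Kit/[해시] 위장/hyuksoon.py | solution
-- ===== SOURCE A (Python) =====
-- def solution(clothes):
--     answer = 1
--     data={}
--     for i in clothes:
--         if i[1] in data:
--             data[i[1]].append(i[0])
--         else:
--             data[i[1]]=[i[0]]
--
--     c=[]
--     for i in data:
--         c.append(len(data[i]))
--     for i in c:
--         answer*=i
--     return answer
-- ===== SOURCE B (Python) =====
-- def solution(clothes):
--     # Partition-refinement loop: no dict; repeatedly take the first remaining
--     # item's category, multiply in the size of that category, drop it.
--     answer = 1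
--     rest = clothes
--     while rest:
--         k = rest[0][1]
--         answer *= 1 + len([i for i in rest[1:] if i[1] == k])
--         rest = [i for i in rest[1:] if i[1] != k]
--     return answer
-- ===== Notes on version B (the rewrite author's own statement) =====
-- stated objective: alternative
-- what changed: Replaced A's hash-dict grouping (build dict of category->items, then multiply value lengths) by a dict-free partition-refinement loop: repeatedly take the first remaining item's category, count and remove all items of that category, multiplying the counts.
import Mathlib
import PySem

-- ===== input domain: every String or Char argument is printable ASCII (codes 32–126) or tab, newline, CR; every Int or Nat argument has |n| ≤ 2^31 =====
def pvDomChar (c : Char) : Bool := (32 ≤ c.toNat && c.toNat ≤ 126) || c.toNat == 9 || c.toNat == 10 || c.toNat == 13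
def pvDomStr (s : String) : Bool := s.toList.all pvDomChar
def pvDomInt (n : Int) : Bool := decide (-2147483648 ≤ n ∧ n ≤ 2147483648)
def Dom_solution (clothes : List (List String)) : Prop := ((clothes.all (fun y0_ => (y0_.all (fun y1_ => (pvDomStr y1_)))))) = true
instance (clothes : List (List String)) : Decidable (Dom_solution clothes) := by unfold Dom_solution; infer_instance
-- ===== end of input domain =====

-- B replaces A's dict-of-categories grouping by a dict-free partition-refinement loop
-- (take the first remaining item's category, count and remove it, multiply); an
-- organizational alternative, not claimed faster.

-- shared transliteration helpers: i[1] and i[0] (total via default, used under Pre_)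
def pvKey (i : List String) : String := PySem.List.pyGetD i 1 ""
def pvVal (i : List String) : String := PySem.List.pyGetD i 0 ""

-- ===== PORT A =====
def solution (clothes : List (List String)) : Int :=
  let data := clothes.foldl (fun d i =>
      if d.contains (pvKey i) then d.modify (pvKey i) [] (· ++ [pvVal i])
      else d.insert (pvKey i) [pvVal i]) PySem.Dict.empty
  let c := data.keys.foldl (fun c k => c ++ [((data.getD k []).length : Int)]) ([] : List Int)
  c.foldl (fun answer i => answer * i) 1

-- ===== PORT B =====
def solution_alt (clothes : List (List String)) : Int :=
  match clothes with
  | [] => 1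
  | i :: rest =>
      (1 + ((rest.filter (fun j => pvKey j == pvKey i)).length : Int)) *
        solution_alt (rest.filter (fun j => pvKey j != pvKey i))
termination_by clothes.length
decreasing_by
  simp only [List.length_cons, List.length_unattach]
  exact Nat.lt_succ_of_le ((List.length_filter_le _ _).trans (by simp))

-- ===== PRECONDITION & SPEC =====
-- Pre_ excludes exactly the inputs on which the Python A raises IndexError: an
-- inner list with fewer than two elements (A reads i[1] and i[0]).
def Pre_solution (clothes : List (List String)) : Prop := ∀ i ∈ clothes, 2 ≤ i.length
instance (clothes : List (List String)) : Decidable (Pre_solution clothes) := by unfold Pre_solution; infer_instance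
def pvWitness_solution : List (List String) := [["a", "hat"], ["b", "hat"], ["c", "top"]]

def Spec_solution (clothes : List (List String)) (out : Int) : Prop := out = solution_alt clothes
instance (clothes : List (List String)) (out : Int) : Decidable (Spec_solution clothes out) := by unfold Spec_solution; infer_instance

-- ===== CLAIM (what is proved, stated in full; the proofs are below) =====
def Claim_equal_solution : Prop := ∀ (clothes : List (List String)), Dom_solution clothes → Pre_solution clothes → Spec_solution clothes (solution clothes)

-- ===== LEMMAS AND PROOFS =====

-- the common specification: product of category-run counts of a key list
def prodC : List String → Int
  | [] => 1
  | k :: t => (1 + (t.count k : Int)) * prodC (t.filter (fun x => x != k))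
termination_by l => l.length
decreasing_by
  simp only [List.length_cons, List.length_unattach]
  exact Nat.lt_succ_of_le ((List.length_filter_le _ _).trans (by simp))

-- equation lemmas in unattached form
lemma solution_alt_nil : solution_alt [] = 1 := by rw [solution_alt]
lemma solution_alt_cons (i : List String) (rest : List (List String)) :
    solution_alt (i :: rest) =
      (1 + ((rest.filter (fun j => pvKey j == pvKey i)).length : Int)) *
        solution_alt (rest.filter (fun j => pvKey j != pvKey i)) := by
  rw [solution_alt]
lemma prodC_nil : prodC [] = 1 := by rw [prodC]
lemma prodC_cons (k : String) (t : List String) :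
    prodC (k :: t) = (1 + (t.count k : Int)) * prodC (t.filter (fun x => x != k)) := by
  rw [prodC]

-- B computes prodC of the key list
lemma solution_alt_eq_prodC (clothes : List (List String)) :
    solution_alt clothes = prodC (clothes.map pvKey) := by
  suffices H : ∀ n (clothes : List (List String)), clothes.length ≤ n →
      solution_alt clothes = prodC (clothes.map pvKey) from H clothes.length clothes le_rfl
  intro n
  induction n with
  | zero =>
    intro clothes h
    rw [List.eq_nil_of_length_eq_zero (Nat.le_zero.mp h), solution_alt_nil, List.map_nil, prodC_nil]
  | succ n ih =>
    intro clothes h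
    cases clothes with
    | nil => rw [solution_alt_nil, List.map_nil, prodC_nil]
    | cons i rest =>
      rw [solution_alt_cons, List.map_cons, prodC_cons,
        ih (rest.filter (fun j => pvKey j != pvKey i))
          ((List.length_filter_le _ _).trans (Nat.lt_succ_iff.mp (by simpa using h)))]
      congr 1
      · congr 1
        simp only [List.count_eq_countP, List.countP_eq_length_filter, List.filter_map,
          List.length_map, Function.comp_def]
      · congr 1
        simp only [List.filter_map, Function.comp_def]

-- the step of A's grouping loop is Dict.modify
lemma stepA_eq_modify (d : PySem.Dict String (List String)) (i : List String) :
    (if d.contains (pvKey i) then d.modify (pvKey i) [] (· ++ [pvVal i])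
     else d.insert (pvKey i) [pvVal i]) = d.modify (pvKey i) [] (· ++ [pvVal i]) := by
  by_cases h : d.contains (pvKey i) = true
  · simp [h]
  · simp only [Bool.not_eq_true] at h
    simp [h, PySem.Dict.modify, PySem.Dict.insert, PySem.Dict.getD_of_not_contains d [] h]

-- removing one value commutes with Python-set construction
lemma discard_ofList (t : List String) (k : String) :
    (PySem.Set.ofList t).filter (fun y => !(y == k)) =
      PySem.Set.ofList (t.filter (fun y => !(y == k))) := by
  induction t generalizing k with
  | nil => rfl
  | cons a t ih =>
    rw [PySem.Set.ofList_cons]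
    by_cases hak : a = k
    · subst hak
      simp only [PySem.Set.discard, List.filter_cons, List.filter_filter, beq_self_eq_true,
        Bool.not_true, if_false, Bool.false_eq_true]
      rw [show (fun y => !(y == a) && !(y == a)) = (fun y => !(y == a)) from by
        funext y; cases h : (y == a) <;> simp]
      exact ih a
    · have hbk : ((!(a == k)) = true) := by simp [hak]
      simp only [PySem.Set.discard, List.filter_cons, List.filter_filter, hbk, if_true]
      rw [show (fun y => !(y == k) && !(y == a)) = (fun y => !(y == a) && !(y == k)) from by
        funext y; cases h1 : (y == k) <;> cases h2 : (y == a) <;> simp]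
      rw [← List.filter_filter, ih k, PySem.Set.ofList_cons, PySem.Set.discard]

-- key lemma: product of per-category counts over the distinct categories = prodC
lemma prod_counts_eq_prodC (K : List String) :
    ((PySem.Set.ofList K).map (fun k => ((K.count k : Nat) : Int))).prod = prodC K := by
  suffices H : ∀ n (K : List String), K.length ≤ n →
      ((PySem.Set.ofList K).map (fun k => ((K.count k : Nat) : Int))).prod = prodC K from
    H K.length K le_rfl
  intro n
  induction n with
  | zero =>
    intro K h
    rw [List.eq_nil_of_length_eq_zero (Nat.le_zero.mp h), prodC_nil]; rfl
  | succ n ih =>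
    intro K h
    cases K with
    | nil => rw [prodC_nil]; rfl
    | cons k t =>
      rw [PySem.Set.ofList_cons, List.map_cons, List.prod_cons, prodC_cons]
      have hdis : PySem.Set.discard (PySem.Set.ofList t) k =
          PySem.Set.ofList (t.filter (fun x => x != k)) := by
        rw [PySem.Set.discard]
        simpa [bne] using discard_ofList t k
      rw [hdis]
      congr 1
      · rw [List.count_cons_self]; push_cast; ring
      · rw [← ih (t.filter (fun x => x != k))
            ((List.length_filter_le _ _).trans (Nat.lt_succ_iff.mp (by simpa using h)))]
        congr 1
        apply List.map_congr_left
        intro j hj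
        have hjk : j ≠ k := by
          have h1 := (PySem.List.mem_dedup _ j).mp hj
          have h2 := List.mem_filter.mp h1
          simpa using h2.2
        congr 1
        simp [hjk, Ne.symm hjk, List.count_filter]

-- A computes the product of per-category counts
lemma solution_eq_prod_counts (clothes : List (List String)) :
    solution clothes =
      ((PySem.Set.ofList (clothes.map pvKey)).map
        (fun k => (((clothes.map pvKey).count k : Nat) : Int))).prod := by
  simp only [solution]
  have hfold : clothes.foldl (fun d i =>
      if d.contains (pvKey i) then d.modify (pvKey i) [] (· ++ [pvVal i])
      else d.insert (pvKey i) [pvVal i]) PySem.Dict.empty =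
      (clothes.map (fun i => (pvKey i, pvVal i))).foldl
        (fun d p => d.modify p.1 [] (· ++ [p.2])) PySem.Dict.empty := by
    rw [List.foldl_map]
    apply List.foldl_ext
    intro d i _
    exact stepA_eq_modify d i
  rw [hfold]
  set data := (clothes.map (fun i => (pvKey i, pvVal i))).foldl
      (fun d p => d.modify p.1 [] (· ++ [p.2])) PySem.Dict.empty with hdata
  have hkeys : data.keys = PySem.Set.ofList (clothes.map pvKey) := by
    rw [hdata, PySem.Dict.keys_foldl_modify_key]
    simp only [PySem.Dict.keys_empty, List.map_map]
    rw [PySem.Set.update_nil_left]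
    rfl
  have hget : ∀ k, data.getD k [] =
      (((clothes.map (fun i => (pvKey i, pvVal i))).filter (fun p => p.1 == k)).map (·.2)) := by
    intro k
    rw [hdata, PySem.Dict.getD_foldl_modify_append]
    simp
  rw [PySem.List.foldl_append_singleton_eq_map, ← List.prod_eq_foldl, hkeys, List.nil_append]
  congr 1
  apply List.map_congr_left
  intro k _
  rw [hget k]
  congr 1
  rw [List.length_map, List.count_eq_countP, List.countP_eq_length_filter, List.filter_map,
    List.length_map, List.filter_map, List.length_map]
  simp [Function.comp_def]

-- ===== VERDICT (by name: the statement is the Claim_ definition above) =====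
theorem solution_spec : Claim_equal_solution := by
  intro clothes _ _
  show solution clothes = solution_alt clothes
  rw [solution_eq_prod_counts, prod_counts_eq_prodC, solution_alt_eq_prodC]
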